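-- pv_equiv track=rewrite | github.com/opendatacube/datacube-core | datacube/cfg.py | smells_like_ini
-- ===== SOURCE A (Python) =====
-- def smells_like_ini(cfg_text: str):
--     for line in cfg_text.split('\n'):
--         line = line.strip()
--         if not line:
--             continue
--         if line[0] in [";", "["]:
--             return True
--         else:
--             return False
--     # Doesn't smell like anything
--     return False
-- ===== SOURCE B (Python) =====
-- def smells_like_ini(cfg_text: str):
--     # Whole-string strip instead of a line-by-line loop: the first
--     # non-whitespace character of the text is the first character of the
--     # first non-blank stripped line ('\n' is itself whitespace).
--     s = cfg_text.strip()
--     return bool(s) and s[0] in (";", "[")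
-- ===== Notes on version B (the rewrite author's own statement) =====
-- stated objective: simpler
-- what changed: Replaces A's split-into-lines loop (strip each line, skip blanks, test the first non-blank line's first char) by a single whole-string strip followed by one first-character test.
import Mathlib
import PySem

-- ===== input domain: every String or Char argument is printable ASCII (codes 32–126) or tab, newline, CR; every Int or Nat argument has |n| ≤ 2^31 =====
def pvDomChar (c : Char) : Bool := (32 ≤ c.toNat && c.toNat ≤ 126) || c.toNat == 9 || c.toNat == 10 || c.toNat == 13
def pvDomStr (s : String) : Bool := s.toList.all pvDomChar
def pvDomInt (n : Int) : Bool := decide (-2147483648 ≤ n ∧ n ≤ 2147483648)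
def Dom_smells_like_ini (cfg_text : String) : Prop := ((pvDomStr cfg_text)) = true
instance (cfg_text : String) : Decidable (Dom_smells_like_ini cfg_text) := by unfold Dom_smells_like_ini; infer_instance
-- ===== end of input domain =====

-- B replaces A's per-line loop by one whole-string strip + first-character test (objective: simpler).

-- ===== PORT A =====
-- the "for line in cfg_text.split('\n')" loop with its early returns
def smells_like_ini_loop : List String → Bool
  | [] => false
  | line :: rest =>
    let l := PySem.Str.strip line
    if l = "" then smells_like_ini_loop rest
    else
      match PySem.Str.pyGet? l 0 with
      | some c => [';', '['].contains c
      | none => false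
  -- 'line = line.strip(); if not line: continue'; 'line[0] in [";", "["]' compares
  -- 1-character strings, which is exactly a char comparison; the none branch of
  -- pyGet? is unreachable (the stripped line is nonempty there)

def smells_like_ini (cfg_text : String) : Bool :=
  match PySem.Str.split? cfg_text "\n" with
  | some lines => smells_like_ini_loop lines
  | none => false
  -- none branch unreachable: the separator "\n" is nonempty

-- ===== PORT B =====
def smells_like_ini_alt (cfg_text : String) : Bool :=
  let s := PySem.Str.strip cfg_text
  if s = "" then false
  else
    match PySem.Str.pyGet? s 0 with
    | some c => [';', '['].contains c
    | none => false
  -- s = cfg_text.strip(); bool(s) and s[0] in (";", "["); none branch unreachable: s ≠ ""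

-- ===== PRECONDITION & SPEC =====
def Spec_smells_like_ini (cfg_text : String) (out : Bool) : Prop := out = smells_like_ini_alt cfg_text
instance (cfg_text : String) (out : Bool) : Decidable (Spec_smells_like_ini cfg_text out) := by unfold Spec_smells_like_ini; infer_instance

-- ===== CLAIM (what is proved, stated in full; the proofs are below) =====
def Claim_equal_smells_like_ini : Prop := ∀ (cfg_text : String), Dom_smells_like_ini cfg_text → Spec_smells_like_ini cfg_text (smells_like_ini cfg_text)

-- ===== LEMMAS AND PROOFS =====
def pvSplit1 : List Char → List (List Char)
  | [] => [[]]
  | c :: cs => if c = '\n' then [] :: pvSplit1 cs else (pvSplit1 cs).modifyHead (c :: ·)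

theorem pvSplit1_ne_nil (cs : List Char) : pvSplit1 cs ≠ [] := by
  induction cs with
  | nil => simp [pvSplit1]
  | cons c cs ih =>
    simp only [pvSplit1]
    split
    · simp
    · cases h : pvSplit1 cs with
      | nil => exact absurd h ih
      | cons L R => simp [List.modifyHead]

theorem pvGo_spec (l : List Char) : ∀ (cur : List Char) (aacc : List (List Char)) (fuel : Nat),
    l.length ≤ fuel →
    PySem.Chars.splitOn.go ['\n'] fuel l cur aacc
      = aacc.reverse ++ (pvSplit1 l).modifyHead (cur.reverse ++ ·) := by
  induction l with
  | nil =>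
    intro cur aacc fuel _
    cases fuel <;> simp [PySem.Chars.splitOn.go, pvSplit1]
  | cons c rest ih =>
    intro cur aacc fuel h
    cases fuel with
    | zero => simp at h
    | succ f =>
      rw [PySem.Chars.splitOn.go]
      by_cases hc : c = '\n'
      · subst hc
        have hpre : List.isPrefixOf ['\n'] ('\n' :: rest) = true := by simp [List.isPrefixOf]
        simp only [hpre, if_pos, List.length_cons, List.length_nil, List.drop_succ_cons, List.drop_zero]
        rw [ih [] (cur.reverse :: aacc) f (by simpa using h)]
        cases hsp : pvSplit1 rest with
        | nil => exact absurd hsp (pvSplit1_ne_nil rest)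
        | cons L R => simp [pvSplit1, hsp, List.modifyHead]
      · have hpre : List.isPrefixOf ['\n'] (c :: rest) = false := by
          simp [List.isPrefixOf]; exact fun hh => absurd hh.symm hc
        simp only [hpre]
        rw [if_neg (by simp)]
        rw [ih (c :: cur) aacc f (by simpa using Nat.lt_succ_iff.mp (by simpa using h))]
        cases hsp : pvSplit1 rest with
        | nil => exact absurd hsp (pvSplit1_ne_nil rest)
        | cons L R => simp [pvSplit1, hc, hsp, List.modifyHead]

theorem pvSplitOn_eq (cs : List Char) :
    PySem.Chars.splitOn cs ['\n'] = pvSplit1 cs := by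
  unfold PySem.Chars.splitOn
  rw [pvGo_spec cs [] [] (cs.length + 1) (by omega)]
  cases hsp : pvSplit1 cs with
  | nil => exact absurd hsp (pvSplit1_ne_nil cs)
  | cons L R => simp [List.modifyHead]

theorem pvStrip_cons_space {c : Char} (l : List Char) (h : PySem.Chars.isspace c = true) :
    PySem.Chars.strip (c :: l) = PySem.Chars.strip l := by
  simp [PySem.Chars.strip, PySem.Chars.lstrip, List.dropWhile, h]

theorem pvStrip_cons_nonspace {c : Char} (l : List Char) (h : PySem.Chars.isspace c = false) :
    PySem.Chars.strip (c :: l) = c :: PySem.Chars.rstrip l := by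
  have hl : PySem.Chars.lstrip (c :: l) = c :: l := by
    simp [PySem.Chars.lstrip, List.dropWhile, h]
  rw [PySem.Chars.strip, hl, PySem.Chars.rstrip]
  simp only [List.reverse_cons, List.dropWhile_append]
  split
  · next hemp =>
    simp [List.dropWhile, h, PySem.Chars.rstrip, List.isEmpty_iff.mp hemp]
  · simp [PySem.Chars.rstrip]

def pvLoopC : List (List Char) → Bool
  | [] => false
  | L :: R =>
    match PySem.Chars.strip L with
    | [] => pvLoopC R
    | c :: _ => [';', '['].contains c

theorem pvMain (cs : List Char) :
    pvLoopC (pvSplit1 cs)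
      = (match PySem.Chars.strip cs with
         | [] => false
         | c :: _ => [';', '['].contains c) := by
  induction cs with
  | nil => simp [pvSplit1, pvLoopC, PySem.Chars.strip, PySem.Chars.lstrip, PySem.Chars.rstrip]
  | cons c cs ih =>
    by_cases hs : PySem.Chars.isspace c = true
    · rw [pvStrip_cons_space cs hs]
      by_cases hc : c = '\n'
      · subst hc
        simpa [pvSplit1, pvLoopC] using ih
      · simp only [pvSplit1, if_neg hc]
        cases hsp : pvSplit1 cs with
        | nil => exact absurd hsp (pvSplit1_ne_nil cs)
        | cons L R =>
          rw [hsp] at ih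
          simpa [pvLoopC, List.modifyHead, pvStrip_cons_space L hs] using ih
    · have hs' : PySem.Chars.isspace c = false := by simpa using hs
      have hc : c ≠ '\n' := by rintro rfl; simp [PySem.Chars.isspace] at hs'
      rw [pvStrip_cons_nonspace cs hs']
      simp only [pvSplit1, if_neg hc]
      cases hsp : pvSplit1 cs with
      | nil => exact absurd hsp (pvSplit1_ne_nil cs)
      | cons L R =>
        simp [pvLoopC, List.modifyHead, pvStrip_cons_nonspace L hs']




theorem pvEmpty_iff (s : String) : s = "" ↔ s.toList = [] := by
  constructor
  · rintro rfl; rfl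
  · intro h
    have := congrArg String.ofList h
    simpa using this

theorem pvHead_match (s : String) :
    (if s = "" then false
     else match PySem.Str.pyGet? s 0 with
          | some c => [';', '['].contains c
          | none => false)
      = (match s.toList with
         | [] => false
         | c :: _ => [';', '['].contains c) := by
  cases h : s.toList with
  | nil => simp [pvEmpty_iff, h]
  | cons c t =>
    have hne : ¬ s = "" := by simp [pvEmpty_iff, h]
    simp [hne, PySem.Str.pyGet?_eq, h, PySem.List.pyGet?, PySem.List.pyIdx?]

theorem pvLoopS_eq (ls : List String) :
    smells_like_ini_loop ls = pvLoopC (ls.map String.toList) := by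
  induction ls with
  | nil => rfl
  | cons line rest ih =>
    show (if PySem.Str.strip line = "" then smells_like_ini_loop rest
          else match PySem.Str.pyGet? (PySem.Str.strip line) 0 with
               | some c => [';', '['].contains c
               | none => false) = _
    cases h : PySem.Chars.strip line.toList with
    | nil =>
      have he : PySem.Str.strip line = "" := by
        rw [pvEmpty_iff, PySem.Str.toList_strip, h]
      simpa [he, pvLoopC, h] using ih
    | cons c t =>
      have hne : ¬ PySem.Str.strip line = "" := by
        simp [pvEmpty_iff, PySem.Str.toList_strip, h]
      simp [hne, pvLoopC, h, PySem.Str.pyGet?_eq, PySem.Str.toList_strip, PySem.List.pyGet?, PySem.List.pyIdx?]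

theorem smells_like_ini_spec : Claim_equal_smells_like_ini := by
  intro cfg _
  unfold Spec_smells_like_ini
  have hb := PySem.Str.split?_map cfg "\n"
  have hsep : ("\n" : String).toList = ['\n'] := rfl
  rw [hsep] at hb
  unfold smells_like_ini
  cases h : PySem.Str.split? cfg "\n" with
  | none => rw [h] at hb; simp [PySem.Chars.split?] at hb
  | some ls =>
    rw [h] at hb
    have hmap : ls.map String.toList = pvSplit1 cfg.toList := by
      simpa [PySem.Chars.split?, pvSplitOn_eq] using hb
    show smells_like_ini_loop ls = _
    rw [pvLoopS_eq, hmap, pvMain]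
    show _ = smells_like_ini_alt cfg
    unfold smells_like_ini_alt
    rw [pvHead_match, PySem.Str.toList_strip]
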